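-- pv_equiv track=rewrite | github.com/christopheradolphe/Python-School-Projects | test_calc2.py | check_sums_up_to_n
-- ===== SOURCE A (Python) =====
-- def check_sums_up_to_n(N):
--     for i in range(1, N+1):
--         total1 = 0
--         for x in range(1, i+1):
--             total1 += x**3
--
--         total2 = 0
--         for x in range(1, i+1):
--             total2 += x
--         total2 **= 2
--
--         if total1 == total2:
--             pass
--         else:
--             return False
--
--     return True
-- ===== SOURCE B (Python) =====
-- def check_sums_up_to_n(N):
--     # One pass: maintain running cube-sum and running linear-sum incrementally,
--     # checking the identity at each step (O(N) instead of A's O(N^2)).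
--     cube_total = 0
--     lin_total = 0
--     for i in range(1, N + 1):
--         cube_total += i ** 3
--         lin_total += i
--         if cube_total != lin_total ** 2:
--             return False
--     return True
-- ===== Notes on version B (the rewrite author's own statement) =====
-- stated objective: faster
-- what changed: Replaces A's nested loops (recomputing both sums from scratch for every i) with a single pass that maintains running cube and linear totals incrementally.
import Mathlib
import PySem

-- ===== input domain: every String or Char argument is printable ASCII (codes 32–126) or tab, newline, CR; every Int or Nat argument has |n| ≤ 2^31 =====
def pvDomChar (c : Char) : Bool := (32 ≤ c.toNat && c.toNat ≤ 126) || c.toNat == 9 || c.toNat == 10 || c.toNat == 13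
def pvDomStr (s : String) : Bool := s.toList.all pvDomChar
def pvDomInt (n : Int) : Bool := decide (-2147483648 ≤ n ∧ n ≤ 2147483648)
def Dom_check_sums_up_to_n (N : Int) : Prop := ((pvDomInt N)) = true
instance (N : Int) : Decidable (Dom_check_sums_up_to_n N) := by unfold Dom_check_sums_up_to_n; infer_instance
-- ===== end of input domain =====

-- B replaces A's nested loops (which recompute both sums from scratch at every i)
-- with a single pass keeping running cube and linear totals: O(N) instead of O(N^2).

-- ===== PORT A =====
-- outer 'for i in …' with early 'return False', as structural recursion on the range list
def aLoop : List Int → Bool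
  | [] => true
  | i :: rest =>
      let total1 := (PySem.List.pyRange 1 (i + 1) 1).foldl (fun s x => s + x ^ 3) 0
      let total2 := ((PySem.List.pyRange 1 (i + 1) 1).foldl (fun s x => s + x) 0) ^ 2
      if total1 == total2 then aLoop rest else false

def check_sums_up_to_n (N : Int) : Bool :=
  aLoop (PySem.List.pyRange 1 (N + 1) 1)

-- ===== PORT B =====
-- one pass with early 'return False', carrying (cube_total, lin_total)
def bLoop : List Int → Int → Int → Bool
  | [], _, _ => true
  | i :: rest, cube_total, lin_total =>
      let cube_total' := cube_total + i ^ 3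
      let lin_total' := lin_total + i
      if cube_total' ≠ lin_total' ^ 2 then false else bLoop rest cube_total' lin_total'

def check_sums_up_to_n_alt (N : Int) : Bool :=
  bLoop (PySem.List.pyRange 1 (N + 1) 1) 0 0

-- ===== PRECONDITION & SPEC =====
def Spec_check_sums_up_to_n (N : Int) (out : Bool) : Prop := out = check_sums_up_to_n_alt N
instance (N : Int) (out : Bool) : Decidable (Spec_check_sums_up_to_n N out) := by unfold Spec_check_sums_up_to_n; infer_instance

-- ===== CLAIM (what is proved, stated in full; the proofs are below) =====
def Claim_equal_check_sums_up_to_n : Prop := ∀ (N : Int), Dom_check_sums_up_to_n N → Spec_check_sums_up_to_n N (check_sums_up_to_n N)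

-- ===== LEMMAS AND PROOFS =====

-- Faulhaber invariant: folding cubes from c and folding from l over a consecutive
-- range keeps 'cube total = (linear total)^2' provided 2*l = (a-1)*a and c = l^2.
theorem fold_cube_sq (k : Nat) : ∀ (a b c l : Int), (b - a).toNat = k →
    2 * l = (a - 1) * a → c = l ^ 2 →
    (PySem.List.pyRange a b 1).foldl (fun s x => s + x ^ 3) c
      = ((PySem.List.pyRange a b 1).foldl (fun s x => s + x) l) ^ 2 := by
  induction k with
  | zero =>
      intro a b c l hk _ hc
      rw [PySem.List.pyRange_one_eq_nil (by omega)]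
      simpa using hc
  | succ n ih =>
      intro a b c l hk h2 hc
      rw [PySem.List.pyRange_one_cons (by omega)]
      simp only [List.foldl_cons]
      exact ih (a + 1) b (c + a ^ 3) (l + a) (by omega) (by ring_nf; nlinarith [h2]) (by linear_combination hc - a * h2)

theorem bLoop_true (k : Nat) : ∀ (a b c l : Int), (b - a).toNat = k →
    2 * l = (a - 1) * a → c = l ^ 2 →
    bLoop (PySem.List.pyRange a b 1) c l = true := by
  induction k with
  | zero =>
      intro a b c l hk _ _
      rw [PySem.List.pyRange_one_eq_nil (by omega)]
      rfl
  | succ n ih =>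
      intro a b c l hk h2 hc
      rw [PySem.List.pyRange_one_cons (by omega)]
      simp only [bLoop]
      have heq : c + a ^ 3 = (l + a) ^ 2 := by linear_combination hc - a * h2
      rw [if_neg (by simpa using heq)]
      exact ih (a + 1) b (c + a ^ 3) (l + a) (by omega) (by ring_nf; nlinarith [h2]) heq

theorem aLoop_true : ∀ (L : List Int), aLoop L = true := by
  intro L
  induction L with
  | nil => rfl
  | cons i rest ih =>
      simp only [aLoop]
      have h := fold_cube_sq (i + 1 - 1).toNat 1 (i + 1) 0 0 rfl (by ring) (by ring)
      rw [if_pos (by simpa using h)]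
      exact ih

-- ===== VERDICT (by name: the statement is the Claim_ definition above) =====
theorem check_sums_up_to_n_spec : Claim_equal_check_sums_up_to_n := by
  intro N _
  unfold Spec_check_sums_up_to_n check_sums_up_to_n check_sums_up_to_n_alt
  rw [aLoop_true, bLoop_true (N + 1 - 1).toNat 1 (N + 1) 0 0 rfl (by ring) (by ring)]
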